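-- pv_equiv track=rewrite | github.com/abe-asic-ip/abe | src/abe/uarch/fifo_depth_utils.py | max_wait_to_next_valid_slot
-- ===== SOURCE A (Python) =====
-- from typing import (
--     TYPE_CHECKING,
--     Any,
--     Dict,
--     Iterable,
--     List,
--     Literal,
--     NamedTuple,
--     Sequence,
-- )
--
-- def max_wait_to_next_valid_slot(mask: List[int]) -> int:
--     """Calculate maximum wait time to next valid slot across all positions in a
--     binary mask.
--
--     Returns the worst-case number of cycles until mask[t+delta] == 1 for any
--     starting position t.
--     """
--     n = len(mask)
--     next_one = [n] * n
--     nxt = n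
--     for i in range(n - 1, -1, -1):
--         if mask[i] == 1:
--             nxt = i
--         next_one[i] = nxt
--     max_wait = 0
--     for t in range(n):
--         if next_one[t] == n:
--             wait = n - t  # no more slots; cap at remaining horizon
--         else:
--             wait = max(0, next_one[t] - t)
--         max_wait = max(max_wait, wait)
--     return max_wait
-- ===== SOURCE B (Python) =====
-- from typing import List
--
--
-- def max_wait_to_next_valid_slot(mask: List[int]) -> int:
--     """Max wait = length of the longest run of consecutive non-valid (!= 1)
--     entries in the mask, scanned in a single forward pass."""
--     best = 0
--     cur = 0
--     for v in mask:
--         cur = 0 if v == 1 else cur + 1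
--         if cur > best:
--             best = cur
--     return best
-- ===== Notes on version B (the rewrite author's own statement) =====
-- stated objective: faster
-- what changed: Replaces the backward next_one-array prefill plus a second full scan by a single forward pass that tracks the length of the current run of non-valid (!=1) entries; the answer is the longest such run.
import Mathlib
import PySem

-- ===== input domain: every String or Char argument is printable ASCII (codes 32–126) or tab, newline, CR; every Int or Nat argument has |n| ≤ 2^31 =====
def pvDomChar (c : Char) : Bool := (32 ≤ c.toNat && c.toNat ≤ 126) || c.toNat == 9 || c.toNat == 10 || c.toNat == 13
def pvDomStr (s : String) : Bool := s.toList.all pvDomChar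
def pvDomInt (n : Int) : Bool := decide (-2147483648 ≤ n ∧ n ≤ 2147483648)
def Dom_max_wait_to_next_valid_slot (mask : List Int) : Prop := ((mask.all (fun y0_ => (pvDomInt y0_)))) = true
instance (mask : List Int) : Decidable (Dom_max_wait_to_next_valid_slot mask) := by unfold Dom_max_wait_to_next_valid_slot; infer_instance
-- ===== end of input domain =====

-- B replaces A's backward next_one array plus full rescan by ONE forward pass tracking the
-- current run of non-valid (≠ 1) entries — the answer is the longest such run (simpler, no array).

-- ===== PORT A =====
def max_wait_to_next_valid_slot (mask : List Int) : Int :=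
  let n : Int := (mask.length : Int)
  let st :=
    (PySem.List.pyRange (n - 1) (-1) (-1)).foldl
      (fun (st : List Int × Int) i =>
        let nxt := if PySem.List.pyGetD mask i 0 = 1 then i else st.2
        (PySem.List.pySetD st.1 i nxt, nxt))
      (List.replicate mask.length n, n)
  (PySem.List.pyRange 0 n 1).foldl
    (fun max_wait t =>
      let wait := if PySem.List.pyGetD st.1 t 0 = n then n - t
                  else max 0 (PySem.List.pyGetD st.1 t 0 - t)
      max max_wait wait)
    0

-- ===== PORT B =====
def max_wait_to_next_valid_slot_alt (mask : List Int) : Int :=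
  (mask.foldl
    (fun (st : Int × Int) v =>
      let cur := if v = 1 then 0 else st.2 + 1
      let best := if cur > st.1 then cur else st.1
      (best, cur))
    (0, 0)).1

-- ===== PRECONDITION & SPEC =====
def Spec_max_wait_to_next_valid_slot (mask : List Int) (out : Int) : Prop := out = max_wait_to_next_valid_slot_alt mask
instance (mask : List Int) (out : Int) : Decidable (Spec_max_wait_to_next_valid_slot mask out) := by unfold Spec_max_wait_to_next_valid_slot; infer_instance

-- ===== CLAIM (what is proved, stated in full; the proofs are below) =====
def Claim_equal_max_wait_to_next_valid_slot : Prop := ∀ (mask : List Int), Dom_max_wait_to_next_valid_slot mask → Spec_max_wait_to_next_valid_slot mask (max_wait_to_next_valid_slot mask)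

-- ===== LEMMAS AND PROOFS =====

-- wait at position 0: length of the leading run of entries ≠ 1
def pvW0 : List Int → Int
  | [] => 0
  | x :: xs => if x = 1 then 0 else 1 + pvW0 xs

-- reference value: max over all start positions t of the wait starting at t
def pvAns : List Int → Int
  | [] => 0
  | x :: xs => max (pvW0 (x :: xs)) (pvAns xs)

-- what A's next_one[t] holds: index of the next 1 at or after t (= length if none)
def pvNxt (mask : List Int) (t : Nat) : Int := (t : Int) + pvW0 (mask.drop t)

lemma pvW0_nonneg (l : List Int) : 0 ≤ pvW0 l := by
  induction l with
  | nil => simp [pvW0]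
  | cons x xs ih => simp only [pvW0]; split <;> omega

lemma pvW0_le_length (l : List Int) : pvW0 l ≤ (l.length : Int) := by
  induction l with
  | nil => simp [pvW0]
  | cons x xs ih => simp only [pvW0, List.length_cons]; split <;> push_cast <;> omega

lemma pvAns_nonneg (l : List Int) : 0 ≤ pvAns l := by
  cases l with
  | nil => simp [pvAns]
  | cons x xs => have := pvW0_nonneg (x :: xs); simp only [pvAns]; omega

lemma pvW0_le_pvAns (l : List Int) : pvW0 l ≤ pvAns l := by
  cases l with
  | nil => simp [pvW0, pvAns]
  | cons x xs => simp only [pvAns]; omega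

lemma pvNxt_length (mask : List Int) : pvNxt mask mask.length = (mask.length : Int) := by
  simp [pvNxt, pvW0]

lemma pvNxt_step (mask : List Int) (m : Nat) (h : m < mask.length) :
    pvNxt mask m = if mask.getD m 0 = 1 then (m : Int) else pvNxt mask (m + 1) := by
  rw [List.getD_eq_getElem mask 0 h]
  simp only [pvNxt, List.drop_eq_getElem_cons h, pvW0]
  split <;> push_cast <;> ring

-- range(m, -1, -1) peels off its first element m
lemma pvRange_down_cons (m : Nat) :
    PySem.List.pyRange (m : Int) (-1) (-1) = (m : Int) :: PySem.List.pyRange ((m : Int) - 1) (-1) (-1) := by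
  cases m with
  | zero =>
    norm_num [PySem.List.pyRange]
  | succ m =>
    unfold PySem.List.pyRange
    norm_num
    rw [if_pos (show (-1 : Int) < (m : Int) by omega),
        show ((m : Int) + 1 + 1).toNat = m + 2 by omega,
        List.range_succ_eq_map, List.map_cons, List.map_map]
    refine List.cons_eq_cons.mpr ⟨by push_cast; omega, ?_⟩
    refine List.map_congr_left (fun k _ => ?_)
    simp only [Function.comp_apply]
    push_cast
    omega

lemma pvSet_map_range (n : Nat) (f : Nat → Int) (m : Nat) (v : Int) :
    ((List.range n).map f).set m v = (List.range n).map (fun i => if i = m then v else f i) := by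
  apply List.ext_getElem
  · simp
  · intro i h1 h2
    simp only [List.getElem_set, List.getElem_map, List.getElem_range]
    by_cases him : i = m
    · subst him; simp
    · rw [if_neg (fun h => him h.symm), if_neg him]

-- characterization of A's first loop: counting down from m-1 fills the positions below m
lemma pvLoop1 (mask : List Int) : ∀ m : Nat, m ≤ mask.length →
    (PySem.List.pyRange ((m : Int) - 1) (-1) (-1)).foldl
      (fun (st : List Int × Int) i =>
        (PySem.List.pySetD st.1 i (if PySem.List.pyGetD mask i 0 = 1 then i else st.2),
         if PySem.List.pyGetD mask i 0 = 1 then i else st.2))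
      ((List.range mask.length).map (fun i => if m ≤ i then pvNxt mask i else (mask.length : Int)), pvNxt mask m)
    = ((List.range mask.length).map (pvNxt mask), pvNxt mask 0) := by
  intro m
  induction m with
  | zero =>
    intro _
    have h0 : PySem.List.pyRange (((0 : Nat) : Int) - 1) (-1) (-1) = [] := by
      rw [show (((0 : Nat) : Int) - 1) = (-1 : Int) by norm_num]
      rfl
    rw [h0, List.foldl_nil]
    refine congrArg (fun l => (l, pvNxt mask 0)) ?_
    exact List.map_congr_left (fun i _ => if_pos (Nat.zero_le i))
  | succ m ih =>
    intro h
    have hm : m < mask.length := h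
    rw [show (((m + 1 : Nat) : Int) - 1) = (m : Int) by push_cast; ring,
        pvRange_down_cons m, List.foldl_cons]
    have hstep : (if PySem.List.pyGetD mask (m : Int) 0 = 1 then (m : Int) else pvNxt mask (m + 1)) = pvNxt mask m := by
      rw [PySem.List.pyGetD_natCast, ← pvNxt_step mask m hm]
    have hset :
        PySem.List.pySetD
          ((List.range mask.length).map (fun i => if m + 1 ≤ i then pvNxt mask i else (mask.length : Int)))
          (m : Int) (pvNxt mask m)
        = (List.range mask.length).map (fun i => if m ≤ i then pvNxt mask i else (mask.length : Int)) := by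
      rw [PySem.List.pySetD_natCast, pvSet_map_range]
      exact List.map_congr_left (fun i _ => by split_ifs <;> simp_all <;> omega)
    simp only [hstep, hset]
    exact ih (Nat.le_of_lt hm)

lemma pvFoldl_max_shift (f : Nat → Int) (l : List Nat) (a b : Int) :
    l.foldl (fun acc x => max acc (f x)) (max a b) = max a (l.foldl (fun acc x => max acc (f x)) b) := by
  induction l generalizing b with
  | nil => simp
  | cons x xs ih => rw [List.foldl_cons, List.foldl_cons, max_assoc]; exact ih _

lemma pvLoop2 (mask : List Int) :
    (List.range mask.length).foldl (fun mw t => max mw (pvW0 (mask.drop t))) 0 = pvAns mask := by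
  induction mask with
  | nil => simp [pvAns]
  | cons x xs ih =>
    rw [List.length_cons, List.range_succ_eq_map, List.foldl_cons, List.foldl_map]
    simp only [List.drop_zero, Nat.succ_eq_add_one, List.drop_succ_cons]
    rw [max_eq_right (pvW0_nonneg (x :: xs)),
        show pvW0 (x :: xs) = max (pvW0 (x :: xs)) 0 from (max_eq_left (pvW0_nonneg (x :: xs))).symm,
        pvFoldl_max_shift (fun t => pvW0 (xs.drop t)) (List.range xs.length) (pvW0 (x :: xs)) 0,
        ih]
    simp [pvAns]

lemma pvA_eq (mask : List Int) : max_wait_to_next_valid_slot mask = pvAns mask := by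
  have hinit : List.replicate mask.length ((mask.length : Int))
      = (List.range mask.length).map (fun i => if mask.length ≤ i then pvNxt mask i else (mask.length : Int)) := by
    apply List.ext_getElem
    · simp
    · intro i h1 h2
      simp only [List.getElem_replicate, List.getElem_map, List.getElem_range]
      rw [if_neg (by simp at h1; omega)]
  have hloop := pvLoop1 mask mask.length le_rfl
  rw [pvNxt_length, ← hinit] at hloop
  unfold max_wait_to_next_valid_slot
  simp only []
  rw [hloop]
  rw [PySem.List.pyRange_zero_nat, List.foldl_map]
  refine Eq.trans (PySem.List.foldl_congr_mem _ _ (fun mw t => max mw (pvW0 (mask.drop t))) 0 ?_) (pvLoop2 mask)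
  intro acc t ht
  have htl : t < mask.length := List.mem_range.mp ht
  have h1 := pvW0_nonneg (mask.drop t)
  have h2 := pvW0_le_length (mask.drop t)
  rw [List.length_drop] at h2
  simp only [PySem.List.pyGetD_natCast, PySem.List.getD_map_range (pvNxt mask) mask.length t 0 htl]
  have harg : (if pvNxt mask t = (mask.length : Int) then (mask.length : Int) - (t : Int)
               else max 0 (pvNxt mask t - (t : Int))) = pvW0 (mask.drop t) := by
    simp only [pvNxt]
    split_ifs <;> omega
  rw [harg]

-- B's running maximum when entered mid-run: the leading run extended by cur
def pvAns' : Int → List Int → Int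
  | _, [] => 0
  | cur, x :: xs => if x = 1 then pvAns' 0 xs else max (cur + 1) (pvAns' (cur + 1) xs)

lemma pvAns'_char (xs : List Int) : ∀ cur : Int, 0 ≤ cur →
    pvAns' cur xs = max (if 0 < pvW0 xs then cur + pvW0 xs else 0) (pvAns xs) := by
  induction xs with
  | nil => intro cur _; simp [pvAns', pvW0, pvAns]
  | cons x xs ih =>
    intro cur hcur
    have h0 := pvW0_nonneg xs
    have h1 := pvW0_le_pvAns xs
    have h2 := pvAns_nonneg xs
    by_cases hx : x = 1
    · rw [show pvAns' cur (x :: xs) = pvAns' 0 xs by simp [pvAns', hx],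
          ih 0 le_rfl]
      simp only [pvAns, pvW0, if_pos hx]
      split_ifs <;> omega
    · rw [show pvAns' cur (x :: xs) = max (cur + 1) (pvAns' (cur + 1) xs) by simp [pvAns', hx],
          ih (cur + 1) (by omega)]
      simp only [pvAns, pvW0, if_neg hx]
      split_ifs <;> omega

lemma pvBfold (xs : List Int) : ∀ best cur : Int, 0 ≤ cur → cur ≤ best →
    (xs.foldl
      (fun (st : Int × Int) v =>
        ((if (if v = 1 then 0 else st.2 + 1) > st.1 then (if v = 1 then 0 else st.2 + 1) else st.1),
         if v = 1 then 0 else st.2 + 1))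
      (best, cur)).1 = max best (pvAns' cur xs) := by
  induction xs with
  | nil => intro best cur h1 h2; simp only [List.foldl_nil, pvAns']; omega
  | cons x xs ih =>
    intro best cur h1 h2
    rw [List.foldl_cons]
    by_cases hx : x = 1
    · simp only [hx, if_true]
      rw [if_neg (show ¬ ((0 : Int) > best) by omega)]
      rw [ih best 0 le_rfl (by omega)]
      simp [pvAns']
    · simp only [if_neg hx]
      rw [show (if cur + 1 > best then cur + 1 else best) = max best (cur + 1) by split_ifs <;> omega]
      rw [ih _ _ (by omega) (le_max_right _ _)]
      rw [show pvAns' cur (x :: xs) = max (cur + 1) (pvAns' (cur + 1) xs) by simp [pvAns', hx]]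
      rw [max_assoc]

lemma pvB_eq (mask : List Int) : max_wait_to_next_valid_slot_alt mask = pvAns mask := by
  unfold max_wait_to_next_valid_slot_alt
  simp only []
  rw [pvBfold mask 0 0 le_rfl le_rfl, pvAns'_char mask 0 le_rfl]
  have h1 := pvW0_le_pvAns mask
  have h2 := pvAns_nonneg mask
  split_ifs <;> omega

-- ===== VERDICT (by name: the statement is the Claim_ definition above) =====
theorem max_wait_to_next_valid_slot_spec : Claim_equal_max_wait_to_next_valid_slot := by
  intro mask _
  unfold Spec_max_wait_to_next_valid_slot
  rw [pvA_eq, pvB_eq]
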